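-- pv_equiv track=rewrite | github.com/nelsonng2258/Tweets-Affecting-Bitcoin-Prices | my_Functions_btc_wrangle.py | grp_tkword_freq_pctchg_price_dict
-- ===== SOURCE A (Python) =====
-- def grp_tkword_freq_pctchg_price_dict(pctl_lt, tkword_lt):
--
--     '''Create a dictionary with key: top keywords of the day, items: occurred frequency, bitcoin price change (%), bitcoin price (usd) within the percentile.'''
--
--     grp_tkword_freq_pctchg_price_dict = {}
--
--     # Iterate over top keyword list.
--     for i in tkword_lt:
--
--         combine_lt = []
--
--         # Iterate over the percentile list that is filled with dictionaries of key: top keyword, items: frequency, bitcoin price change (%), bitcoin price (usd).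
--         for j in pctl_lt:
--             for k, l in j.items():
--
--                 # Append to combine_lt if the top keyword matches so that frequency, bitcoin price change (%), bitcoin price (usd) will be grouped together.
--                 if i == k:
--                     combine_lt.append(l)
--
--         # Add the combine_lt into grp_tkword_freq_pctchg_price_dict with the key word being top keyword.
--         grp_tkword_freq_pctchg_price_dict[i] = combine_lt
--
--     return grp_tkword_freq_pctchg_price_dict
-- ===== SOURCE B (Python) =====
-- def grp_tkword_freq_pctchg_price_dict(pctl_lt, tkword_lt):
--     '''Flatten once, build a key->values index in one pass, then one lookup per distinct keyword.'''
--     pairs = [kl for j in pctl_lt for kl in j.items()]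
--     index = {}
--     for k, l in pairs:
--         index.setdefault(k, []).append(l)
--     keys = list(dict.fromkeys(tkword_lt))
--     return dict((i, index.get(i, [])) for i in keys)
-- ===== Notes on version B (the rewrite author's own statement) =====
-- stated objective: faster
-- what changed: Instead of rescanning every dict in pctl_lt for each keyword, B flattens the pairs once, builds a key->values index in one pass, deduplicates the keywords and answers each by a single lookup.
import Mathlib
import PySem

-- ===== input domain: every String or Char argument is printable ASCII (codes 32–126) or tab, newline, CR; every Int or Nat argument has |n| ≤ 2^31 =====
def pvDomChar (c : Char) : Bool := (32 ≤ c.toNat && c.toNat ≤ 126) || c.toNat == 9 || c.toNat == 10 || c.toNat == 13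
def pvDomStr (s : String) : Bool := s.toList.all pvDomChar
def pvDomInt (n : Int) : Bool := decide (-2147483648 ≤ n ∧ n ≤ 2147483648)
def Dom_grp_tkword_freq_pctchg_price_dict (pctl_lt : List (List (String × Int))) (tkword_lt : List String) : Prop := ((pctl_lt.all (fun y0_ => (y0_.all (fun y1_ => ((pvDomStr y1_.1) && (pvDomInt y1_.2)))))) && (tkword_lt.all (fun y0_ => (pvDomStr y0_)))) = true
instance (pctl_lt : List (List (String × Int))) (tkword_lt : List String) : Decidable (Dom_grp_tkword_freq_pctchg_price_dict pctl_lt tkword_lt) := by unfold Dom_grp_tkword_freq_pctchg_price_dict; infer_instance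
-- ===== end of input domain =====

-- B replaces A's per-keyword rescan of all dicts (O(K·N)) with: flatten the pairs once,
-- build a key→values index in one pass, then one lookup per distinct keyword (objective: faster).

-- ===== PORT A =====
-- for each keyword i: scan every dict j in pctl_lt, appending matching values, then insert
def grp_tkword_freq_pctchg_price_dict (pctl_lt : List (List (String × Int))) (tkword_lt : List String) : List (String × List Int) :=
  (tkword_lt.foldl (fun d i =>
      let combine_lt : List Int :=
        pctl_lt.foldl (fun acc j =>
          j.foldl (fun acc kl => if i == kl.1 then acc ++ [kl.2] else acc) acc) []
      d.insert i combine_lt)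
    (PySem.Dict.empty : PySem.Dict String (List Int))).items

-- ===== PORT B =====
-- pairs = flatten; index.setdefault(k, []).append(l) ≡ modify k [] (· ++ [l]);
-- dict((i, …) for i in keys) over the DISTINCT keys (dict.fromkeys dedup, PySem.List.dedup)
-- in insertion order IS exactly this association list.
def grp_tkword_freq_pctchg_price_dict_alt (pctl_lt : List (List (String × Int))) (tkword_lt : List String) : List (String × List Int) :=
  let pairs : List (String × Int) := pctl_lt.flatMap (fun j => j)
  let index : PySem.Dict String (List Int) :=
    pairs.foldl (fun d kl => d.modify kl.1 [] (· ++ [kl.2])) PySem.Dict.empty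
  let keys : List String := PySem.List.dedup tkword_lt
  keys.map (fun i => (i, index.getD i []))

-- ===== PRECONDITION & SPEC =====
def Spec_grp_tkword_freq_pctchg_price_dict (pctl_lt : List (List (String × Int))) (tkword_lt : List String) (out : List (String × List Int)) : Prop := out = grp_tkword_freq_pctchg_price_dict_alt pctl_lt tkword_lt
instance (pctl_lt : List (List (String × Int))) (tkword_lt : List String) (out : List (String × List Int)) : Decidable (Spec_grp_tkword_freq_pctchg_price_dict pctl_lt tkword_lt out) := by unfold Spec_grp_tkword_freq_pctchg_price_dict; infer_instance

-- ===== CLAIM (what is proved, stated in full; the proofs are below) =====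
def Claim_equal_grp_tkword_freq_pctchg_price_dict : Prop := ∀ (pctl_lt : List (List (String × Int))) (tkword_lt : List String), Dom_grp_tkword_freq_pctchg_price_dict pctl_lt tkword_lt → Spec_grp_tkword_freq_pctchg_price_dict pctl_lt tkword_lt (grp_tkword_freq_pctchg_price_dict pctl_lt tkword_lt)

-- ===== LEMMAS AND PROOFS =====

-- A's inner double loop for keyword i = the matching values of the flattened pair list
theorem combineA_eq (pctl_lt : List (List (String × Int))) (i : String) :
    pctl_lt.foldl (fun acc j =>
      j.foldl (fun acc kl => if i == kl.1 then acc ++ [kl.2] else acc) acc) ([] : List Int)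
    = (pctl_lt.flatten.filter (fun p => p.1 == i)).map (·.2) := by
  rw [← List.foldl_flatten, PySem.List.foldl_append_if]
  simp only [List.nil_append]
  congr 1
  apply List.filter_congr
  intro p _
  exact Bool.beq_comm

-- B's index lookup yields the same list
theorem indexB_getD (pctl_lt : List (List (String × Int))) (i : String) :
    ((pctl_lt.flatMap (fun j => j)).foldl
        (fun d kl => d.modify kl.1 [] (· ++ [kl.2]))
        (PySem.Dict.empty : PySem.Dict String (List Int))).getD i []
    = (pctl_lt.flatten.filter (fun p => p.1 == i)).map (·.2) := by
  have h := PySem.Dict.getD_foldl_modify_append (l := pctl_lt.flatMap (fun j => j))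
    (d := (PySem.Dict.empty : PySem.Dict String (List Int))) (c := i)
  simpa [List.flatMap_def] using h

-- every value stored by A's loop is the combine list of its own key
theorem itemsA_snd (l : List String) (f : String → List Int)
    (d : PySem.Dict String (List Int)) (hd : ∀ p ∈ d.items, p.2 = f p.1) :
    ∀ p ∈ (l.foldl (fun d i => d.insert i (f i)) d).items, p.2 = f p.1 := by
  induction l generalizing d with
  | nil => simpa using hd
  | cons x xs ih =>
      simp only [List.foldl_cons]
      apply ih
      intro p hp
      rcases (PySem.Dict.mem_items_insert _ _ _ p).1 hp with h | ⟨h, _⟩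
      · subst h; rfl
      · exact hd p h

-- a dict whose values are f of their keys has items = keys.map (k, f k)
theorem items_eq_keys_map (d : PySem.Dict String (List Int)) (f : String → List Int)
    (hd : ∀ p ∈ d.items, p.2 = f p.1) :
    d.items = d.keys.map (fun k => (k, f k)) := by
  simp only [PySem.Dict.keys, List.map_map]
  conv_lhs => rw [← List.map_id d.items]
  apply List.map_congr_left
  intro p hp
  obtain ⟨a, b⟩ := p
  have := hd (a, b) hp
  simp only [Function.comp, id_eq, Prod.mk.injEq]
  exact ⟨trivial, this⟩

-- keys of A's insert loop = first-occurrence dedup of the keyword list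
theorem keysA_eq (l : List String) (f : String → List Int) :
    ((l.foldl (fun d i => d.insert i (f i)) (PySem.Dict.empty : PySem.Dict String (List Int)))).keys
    = PySem.List.dedup l := by
  have h := PySem.Dict.keys_foldl_insert (l := l) (f := fun _ i => f i)
    (d := (PySem.Dict.empty : PySem.Dict String (List Int)))
  simpa [PySem.Dict.keys_empty, PySem.Set.update, PySem.Set.ofList_eq_foldl] using h

theorem grp_tkword_freq_pctchg_price_dict_spec : Claim_equal_grp_tkword_freq_pctchg_price_dict := by
  intro pctl_lt tkword_lt _
  unfold Spec_grp_tkword_freq_pctchg_price_dict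
  unfold grp_tkword_freq_pctchg_price_dict grp_tkword_freq_pctchg_price_dict_alt
  simp only []
  set f : String → List Int := fun i =>
    pctl_lt.foldl (fun acc j =>
      j.foldl (fun acc kl => if i == kl.1 then acc ++ [kl.2] else acc) acc) [] with hf
  rw [items_eq_keys_map _ f (itemsA_snd tkword_lt f _ (by intro p hp; simp [PySem.Dict.empty] at hp))]
  rw [keysA_eq tkword_lt f]
  apply List.map_congr_left
  intro i _
  simp only [hf]
  rw [combineA_eq, indexB_getD]
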